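-- pv_equiv track=rewrite | github.com/ethanleighfellows/choose-your-own-adventure | validate.py | bfs_depth
-- ===== SOURCE A (Python) =====
-- from collections import deque
--
-- def bfs_depth(entry_id: str, graph: dict[str, list[str]]) -> int:
--     if entry_id not in graph:
--         return 0
--     q: deque[tuple[str, int]] = deque([(entry_id, 0)])
--     seen = {entry_id}
--     max_depth = 0
--     while q:
--         node, d = q.popleft()
--         if d > max_depth:
--             max_depth = d
--         for nxt in graph.get(node, []):
--             if nxt not in seen:
--                 seen.add(nxt)
--                 q.append((nxt, d + 1))
--     return max_depth
-- ===== SOURCE B (Python) =====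
-- def bfs_depth(entry_id: str, graph: dict[str, list[str]]) -> int:
--     # Round-based reachability closure (Kleene fixpoint of the one-step successor
--     # operator) instead of a BFS queue: R_k = nodes reachable in <= k steps;
--     # iterate R_{k+1} = R_k | successors(R_k) until it stabilizes; the number of
--     # growing rounds is exactly the maximum BFS depth.
--     if entry_id not in graph:
--         return 0
--     reach = {entry_id}
--     depth = 0
--     while True:
--         new_reach = set(reach)
--         for node in reach:
--             new_reach.update(graph.get(node, []))
--         if len(new_reach) == len(reach):
--             return depth
--         reach = new_reach
--         depth += 1
-- ===== Notes on version B (the rewrite author's own statement) =====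
-- stated objective: alternative
-- what changed: Replaced the (node, depth) queue BFS with a round-based reachability-closure iteration: repeatedly apply the one-step successor operator to the whole reachable set until it stabilizes, counting the growing rounds; no queue, no frontier, no per-node depth bookkeeping.
import Mathlib
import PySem

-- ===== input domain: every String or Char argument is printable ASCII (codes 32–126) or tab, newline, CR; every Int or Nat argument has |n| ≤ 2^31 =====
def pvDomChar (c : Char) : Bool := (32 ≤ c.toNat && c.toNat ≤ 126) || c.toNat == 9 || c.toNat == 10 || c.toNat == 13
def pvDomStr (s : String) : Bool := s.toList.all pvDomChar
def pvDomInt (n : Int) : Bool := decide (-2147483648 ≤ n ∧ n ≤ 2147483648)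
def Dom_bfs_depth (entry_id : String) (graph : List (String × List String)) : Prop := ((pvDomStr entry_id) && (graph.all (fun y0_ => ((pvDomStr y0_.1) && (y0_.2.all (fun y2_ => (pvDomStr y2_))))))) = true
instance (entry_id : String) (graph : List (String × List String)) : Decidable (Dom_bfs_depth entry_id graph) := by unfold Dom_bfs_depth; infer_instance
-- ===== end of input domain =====

-- B replaces the (node, depth) queue BFS by a round-based reachability-closure iteration
-- (R_{k+1} = R_k ∪ successors(R_k) until stable, counting growing rounds); equality of the
-- returned int is proved for all inputs. B iterates over a Python set, whose hash order is
-- not modelled; the port iterates it in insertion order, which is exact here because the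
-- round's result set and the returned int do not depend on that order.

-- pvCap: how many graph-adjacency nodes are not yet in the given set — the termination measure for all loops.
def pvCap (graph : List (String × List String)) (seen : PySem.Set String) : Nat :=
  ((PySem.List.dedup (graph.flatMap Prod.snd)).filter (fun x => !(PySem.Set.contains seen x))).length

-- strict filter-length lemma used for the termination measures
theorem pvFilt_lt {α : Type} (l : List α) (p q : α → Bool) (himp : ∀ a, q a = true → p a = true)
    (x : α) (hx : x ∈ l) (hpx : p x = true) (hqx : q x = false) :
    (l.filter q).length < (l.filter p).length := by
  have h1 : (l.filter p).filter q = l.filter q := by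
    rw [List.filter_filter]
    refine List.filter_congr ?_
    intro a _
    by_cases hq : q a = true
    · simp [hq, himp a hq]
    · simp only [Bool.not_eq_true] at hq; simp [hq]
  rw [← h1, List.length_filter_lt_length_iff_exists]
  exact ⟨x, List.mem_filter.mpr ⟨hx, hpx⟩, by simp [hqx]⟩

theorem pvCap_add_lt (graph : List (String × List String)) (s : PySem.Set String) (x : String)
    (hx : x ∈ graph.flatMap Prod.snd) (hc : PySem.Set.contains s x = false) :
    pvCap graph (PySem.Set.add s x) < pvCap graph s := by
  have hxs : x ∉ s := by simpa [PySem.Set.contains] using hc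
  refine pvFilt_lt _ _ _ ?_ x ?_ ?_ ?_
  · intro a ha
    simp only [Bool.not_eq_eq_eq_not, Bool.not_true, PySem.Set.contains] at ha ⊢
    simp only [List.contains_eq_mem, decide_eq_false_iff_not] at ha ⊢
    intro has
    exact ha ((PySem.Set.mem_add s x a).mpr (Or.inl has))
  · rw [PySem.List.mem_dedup]; exact hx
  · simp [PySem.Set.contains, hxs]
  · have : x ∈ PySem.Set.add s x := (PySem.Set.mem_add s x x).mpr (Or.inr rfl)
    simp [PySem.Set.contains, this]

-- superset variant of the strict decrease, for B's round step
theorem pvCap_grow_lt (graph : List (String × List String)) (r nr : PySem.Set String)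
    (hsub : ∀ a, a ∈ r → a ∈ nr) (x : String)
    (hx : x ∈ graph.flatMap Prod.snd) (hxr : x ∉ r) (hxnr : x ∈ nr) :
    pvCap graph nr < pvCap graph r := by
  refine pvFilt_lt _ _ _ ?_ x ?_ ?_ ?_
  · intro a ha
    simp only [Bool.not_eq_eq_eq_not, Bool.not_true, PySem.Set.contains] at ha ⊢
    simp only [List.contains_eq_mem, decide_eq_false_iff_not] at ha ⊢
    intro har
    exact ha (hsub a har)
  · rw [PySem.List.mem_dedup]; exact hx
  · simp [PySem.Set.contains, hxr]
  · simp [PySem.Set.contains, hxnr]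

-- ===== PORT A =====
-- one iteration of A's inner `for nxt in graph.get(node, [])` loop; state = (seen, q)
def pvStepA (d : Int) (acc : PySem.Set String × List (String × Int)) (nxt : String) : PySem.Set String × List (String × Int) :=
  if PySem.Set.contains acc.1 nxt then acc else (PySem.Set.add acc.1 nxt, acc.2 ++ [(nxt, d + 1)])

theorem pvStepA_le (graph : List (String × List String)) (d : Int) (ns : List String)
    (acc : PySem.Set String × List (String × Int)) (h : ∀ x ∈ ns, x ∈ graph.flatMap Prod.snd) :
    (ns.foldl (pvStepA d) acc).2.length + pvCap graph (ns.foldl (pvStepA d) acc).1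
      ≤ acc.2.length + pvCap graph acc.1 := by
  revert acc h
  induction ns with
  | nil => intro acc h; simp
  | cons n t ih =>
    intro acc h
    simp only [List.foldl_cons]
    by_cases hc : PySem.Set.contains acc.1 n = true
    · have hmem : n ∈ acc.1 := by simpa [PySem.Set.contains] using hc
      have hstep : pvStepA d acc n = acc := by simp [pvStepA, PySem.Set.contains, hmem]
      rw [hstep]
      exact ih acc (fun x hx => h x (List.mem_cons_of_mem _ hx))
    · rw [Bool.not_eq_true] at hc
      have hmem : n ∉ acc.1 := by simpa [PySem.Set.contains] using hc
      have hstep : pvStepA d acc n = (PySem.Set.add acc.1 n, acc.2 ++ [(n, d + 1)]) := by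
        simp [pvStepA, PySem.Set.contains, hmem]
      rw [hstep]
      have h1 := ih (PySem.Set.add acc.1 n, acc.2 ++ [(n, d + 1)])
        (fun x hx => h x (List.mem_cons_of_mem _ hx))
      have h2 := pvCap_add_lt graph acc.1 n (h n List.mem_cons_self) hc
      simp only [List.length_append, List.length_cons, List.length_nil] at h1 ⊢
      omega

theorem pvGetD_subset (graph : List (String × List String)) (node : String) :
    ∀ x ∈ (PySem.Dict.mk graph).getD node [], x ∈ graph.flatMap Prod.snd := by
  induction graph with
  | nil => simp [PySem.Dict.getD, PySem.Dict.get?]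
  | cons p rest ih =>
    intro x hx
    rw [PySem.Dict.getD_eq_get?_getD] at hx
    obtain ⟨k, v⟩ := p
    rw [PySem.Dict.get?_mk_cons] at hx
    by_cases hk : (k == node) = true
    · simp only [hk, if_true, Option.getD_some] at hx
      simp only [List.flatMap_cons, List.mem_append]
      exact Or.inl hx
    · rw [if_neg (by simpa using hk)] at hx
      rw [← PySem.Dict.getD_eq_get?_getD] at hx
      simp only [List.flatMap_cons, List.mem_append]
      exact Or.inr (ih x hx)

-- A's `while q` loop
def pvLoopA (graph : List (String × List String)) : List (String × Int) → PySem.Set String → Int → Int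
  | [], _, max_depth => max_depth
  | (node, d) :: rest, seen, max_depth =>
    let max_depth := if d > max_depth then d else max_depth
    let res := ((PySem.Dict.mk graph).getD node []).foldl (pvStepA d) (seen, rest)
    pvLoopA graph res.2 res.1 max_depth
termination_by q seen _ => q.length + pvCap graph seen
decreasing_by
  have := pvStepA_le graph d ((PySem.Dict.mk graph).getD node []) (seen, rest) (pvGetD_subset graph node)
  simp at this ⊢
  omega

def bfs_depth (entry_id : String) (graph : List (String × List String)) : Int :=
  if !(PySem.Dict.mk graph).contains entry_id then 0
  else pvLoopA graph [(entry_id, 0)] (PySem.Set.ofList [entry_id]) 0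

-- ===== PORT B =====
-- body of B's `for node in reach` loop: new_reach.update(graph.get(node, []))
def pvRound (graph : List (String × List String)) (r : PySem.Set String) (node : String) : PySem.Set String :=
  PySem.Set.update r ((PySem.Dict.mk graph).getD node [])

-- structure of a fold of Set.add: the set grows by an appended block of fresh elements of ns
theorem pvFoldAdd (ns : List String) : ∀ (r : PySem.Set String),
    ∃ extra, ns.foldl PySem.Set.add r = r ++ extra ∧ ∀ x ∈ extra, x ∈ ns ∧ x ∉ r := by
  induction ns with
  | nil => intro r; exact ⟨[], by simp⟩
  | cons n t ih =>
    intro r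
    simp only [List.foldl_cons]
    by_cases hmem : n ∈ r
    · have : PySem.Set.add r n = r := by simp [PySem.Set.add, PySem.Set.contains, hmem]
      rw [this]
      obtain ⟨e, he, hp⟩ := ih r
      exact ⟨e, he, fun x hx => ⟨List.mem_cons_of_mem _ (hp x hx).1, (hp x hx).2⟩⟩
    · have : PySem.Set.add r n = r ++ [n] := by simp [PySem.Set.add, PySem.Set.contains, hmem]
      rw [this]
      obtain ⟨e, he, hp⟩ := ih (r ++ [n])
      refine ⟨n :: e, by simp [he], ?_⟩
      intro x hx
      rcases List.mem_cons.mp hx with h | h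
      · exact ⟨h ▸ List.mem_cons_self, h ▸ hmem⟩
      · refine ⟨List.mem_cons_of_mem _ (hp x h).1, fun hr => (hp x h).2 ?_⟩
        simp [hr]
  
-- one whole round of B grows the set by a block of fresh adjacency nodes
theorem pvFoldRound (graph : List (String × List String)) (l : List String) :
    ∀ (r : PySem.Set String),
    ∃ extra, l.foldl (pvRound graph) r = r ++ extra
      ∧ ∀ x ∈ extra, x ∈ graph.flatMap Prod.snd ∧ x ∉ r := by
  induction l with
  | nil => intro r; exact ⟨[], by simp⟩
  | cons node t ih =>
    intro r
    simp only [List.foldl_cons]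
    obtain ⟨e1, he1, hp1⟩ := pvFoldAdd ((PySem.Dict.mk graph).getD node []) r
    have hr1 : pvRound graph r node = r ++ e1 := by
      simpa [pvRound, PySem.Set.update] using he1
    rw [hr1]
    obtain ⟨e2, he2, hp2⟩ := ih (r ++ e1)
    refine ⟨e1 ++ e2, by simp [he2], ?_⟩
    intro x hx
    rcases List.mem_append.mp hx with h | h
    · exact ⟨pvGetD_subset graph node x (hp1 x h).1, (hp1 x h).2⟩
    · exact ⟨(hp2 x h).1, fun hr => (hp2 x h).2 (List.mem_append.mpr (Or.inl hr))⟩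

-- B's `while True` loop
def pvLoopB (graph : List (String × List String)) (reach : PySem.Set String) (depth : Int) : Int :=
  -- new_reach starts as a copy of reach and is updated while iterating over reach
  if (reach.foldl (pvRound graph) reach).length == reach.length then depth
  else pvLoopB graph (reach.foldl (pvRound graph) reach) (depth + 1)
termination_by pvCap graph reach
decreasing_by
  simp only [List.foldl_attach] at *
  rename_i hne
  obtain ⟨extra, he, hp⟩ := pvFoldRound graph reach reach
  rcases hex : extra with _ | ⟨x, tl⟩
  · exfalso; rw [hex] at he; simp [he] at hne
  · have hx : x ∈ extra := by rw [hex]; exact List.mem_cons_self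
    refine pvCap_grow_lt graph reach _ ?_ x (hp x hx).1 (hp x hx).2 ?_
    · intro a ha; rw [he]; exact List.mem_append.mpr (Or.inl ha)
    · rw [he]; exact List.mem_append.mpr (Or.inr hx)

def bfs_depth_alt (entry_id : String) (graph : List (String × List String)) : Int :=
  if !(PySem.Dict.mk graph).contains entry_id then 0
  else pvLoopB graph (PySem.Set.ofList [entry_id]) 0

-- ===== PRECONDITION & SPEC =====
def Spec_bfs_depth (entry_id : String) (graph : List (String × List String)) (out : Int) : Prop := out = bfs_depth_alt entry_id graph
instance (entry_id : String) (graph : List (String × List String)) (out : Int) : Decidable (Spec_bfs_depth entry_id graph out) := by unfold Spec_bfs_depth; infer_instance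

-- ===== CLAIM (what is proved, stated in full; the proofs are below) =====
def Claim_equal_bfs_depth : Prop := ∀ (entry_id : String) (graph : List (String × List String)), Dom_bfs_depth entry_id graph → Spec_bfs_depth entry_id graph (bfs_depth entry_id graph)

-- ===== LEMMAS AND PROOFS =====
-- Ghost intermediate program: level-order frontier BFS. A is proved equal to it (pvMain),
-- and it is proved equal to B's closure iteration (pvBridge).

-- frontier BFS inner step; state = (seen, nxt_frontier)
def pvStepB (acc : PySem.Set String × List String) (nxt : String) : PySem.Set String × List String :=
  if PySem.Set.contains acc.1 nxt then acc else (PySem.Set.add acc.1 nxt, acc.2 ++ [nxt])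

def pvExpandB (graph : List (String × List String)) (acc : PySem.Set String × List String) (node : String) : PySem.Set String × List String :=
  ((PySem.Dict.mk graph).getD node []).foldl pvStepB acc

theorem pvStepB_le (graph : List (String × List String)) (ns : List String)
    (acc : PySem.Set String × List String) (h : ∀ x ∈ ns, x ∈ graph.flatMap Prod.snd) :
    (ns.foldl pvStepB acc).2.length + pvCap graph (ns.foldl pvStepB acc).1
      ≤ acc.2.length + pvCap graph acc.1 := by
  revert acc h
  induction ns with
  | nil => intro acc h; simp
  | cons n t ih =>
    intro acc h
    simp only [List.foldl_cons]
    by_cases hc : PySem.Set.contains acc.1 n = true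
    · have hmem : n ∈ acc.1 := by simpa [PySem.Set.contains] using hc
      have hstep : pvStepB acc n = acc := by simp [pvStepB, PySem.Set.contains, hmem]
      rw [hstep]
      exact ih acc (fun x hx => h x (List.mem_cons_of_mem _ hx))
    · rw [Bool.not_eq_true] at hc
      have hmem : n ∉ acc.1 := by simpa [PySem.Set.contains] using hc
      have hstep : pvStepB acc n = (PySem.Set.add acc.1 n, acc.2 ++ [n]) := by
        simp [pvStepB, PySem.Set.contains, hmem]
      rw [hstep]
      have h1 := ih (PySem.Set.add acc.1 n, acc.2 ++ [n])
        (fun x hx => h x (List.mem_cons_of_mem _ hx))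
      have h2 := pvCap_add_lt graph acc.1 n (h n List.mem_cons_self) hc
      simp only [List.length_append, List.length_cons, List.length_nil] at h1 ⊢
      omega

theorem pvExpandB_le (graph : List (String × List String)) (frontier : List String)
    (acc : PySem.Set String × List String) :
    (frontier.foldl (pvExpandB graph) acc).2.length + pvCap graph (frontier.foldl (pvExpandB graph) acc).1
      ≤ acc.2.length + pvCap graph acc.1 := by
  revert acc
  induction frontier with
  | nil => intro acc; simp
  | cons node t ih =>
    intro acc
    simp only [List.foldl_cons]
    exact le_trans (ih (pvExpandB graph acc node))
      (pvStepB_le graph _ acc (pvGetD_subset graph node))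

-- frontier BFS `while frontier` loop
def pvLoopF (graph : List (String × List String)) (frontier : List String) (seen : PySem.Set String) (depth : Int) : Int :=
  if (frontier.foldl (pvExpandB graph) (seen, [])).2.isEmpty then depth
  else pvLoopF graph (frontier.foldl (pvExpandB graph) (seen, [])).2
         (frontier.foldl (pvExpandB graph) (seen, [])).1 (depth + 1)
termination_by pvCap graph seen
decreasing_by
  simp only [List.foldl_attach] at *
  have hle := pvExpandB_le graph frontier (seen, [])
  rename_i hne
  rw [List.isEmpty_iff] at hne
  have hlen := List.length_pos_of_ne_nil hne
  simp only [List.length_nil, Nat.zero_add] at hle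
  omega

-- accumulator decomposition for the two inner folds
theorem pvFoldB_acc (ns : List String) (s : PySem.Set String) (acc : List String) :
    ns.foldl pvStepB (s, acc)
      = ((ns.foldl pvStepB (s, [])).1, acc ++ (ns.foldl pvStepB (s, [])).2) := by
  revert s acc
  induction ns with
  | nil => intro s acc; simp
  | cons n t ih =>
    intro s acc
    simp only [List.foldl_cons]
    by_cases hmem : n ∈ s
    · have h1 : pvStepB (s, acc) n = (s, acc) := by simp [pvStepB, PySem.Set.contains, hmem]
      have h2 : pvStepB (s, []) n = (s, []) := by simp [pvStepB, PySem.Set.contains, hmem]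
      rw [h1, h2]
      exact ih s acc
    · have h1 : pvStepB (s, acc) n = (PySem.Set.add s n, acc ++ [n]) := by
        simp [pvStepB, PySem.Set.contains, hmem]
      have h2 : pvStepB (s, []) n = (PySem.Set.add s n, [n]) := by
        simp [pvStepB, PySem.Set.contains, hmem]
      rw [h1, h2, ih (PySem.Set.add s n) (acc ++ [n]), ih (PySem.Set.add s n) [n]]
      simp

theorem pvFoldA_acc (d : Int) (ns : List String) (s : PySem.Set String) (acc : List (String × Int)) :
    ns.foldl (pvStepA d) (s, acc)
      = ((ns.foldl (pvStepA d) (s, [])).1, acc ++ (ns.foldl (pvStepA d) (s, [])).2) := by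
  revert s acc
  induction ns with
  | nil => intro s acc; simp
  | cons n t ih =>
    intro s acc
    simp only [List.foldl_cons]
    by_cases hmem : n ∈ s
    · have h1 : pvStepA d (s, acc) n = (s, acc) := by simp [pvStepA, PySem.Set.contains, hmem]
      have h2 : pvStepA d (s, []) n = (s, []) := by simp [pvStepA, PySem.Set.contains, hmem]
      rw [h1, h2]
      exact ih s acc
    · have h1 : pvStepA d (s, acc) n = (PySem.Set.add s n, acc ++ [(n, d + 1)]) := by
        simp [pvStepA, PySem.Set.contains, hmem]
      have h2 : pvStepA d (s, []) n = (PySem.Set.add s n, [(n, d + 1)]) := by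
        simp [pvStepA, PySem.Set.contains, hmem]
      rw [h1, h2, ih (PySem.Set.add s n) (acc ++ [(n, d + 1)]), ih (PySem.Set.add s n) [(n, d + 1)]]
      simp

-- A's inner fold is the frontier fold with each collected node tagged with depth d+1
theorem pvFold_corr (d : Int) (ns : List String) (s : PySem.Set String) :
    ns.foldl (pvStepA d) (s, ([] : List (String × Int)))
      = ((ns.foldl pvStepB (s, [])).1, (ns.foldl pvStepB (s, [])).2.map (fun x => (x, d + 1))) := by
  revert s
  induction ns with
  | nil => intro s; simp
  | cons n t ih =>
    intro s
    simp only [List.foldl_cons]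
    by_cases hmem : n ∈ s
    · have h1 : pvStepA d (s, []) n = (s, []) := by simp [pvStepA, PySem.Set.contains, hmem]
      have h2 : pvStepB (s, []) n = (s, []) := by simp [pvStepB, PySem.Set.contains, hmem]
      rw [h1, h2]
      exact ih s
    · have h1 : pvStepA d (s, []) n = (PySem.Set.add s n, [(n, d + 1)]) := by
        simp [pvStepA, PySem.Set.contains, hmem]
      have h2 : pvStepB (s, []) n = (PySem.Set.add s n, [n]) := by
        simp [pvStepB, PySem.Set.contains, hmem]
      rw [h1, h2, pvFoldA_acc d t (PySem.Set.add s n) [(n, d + 1)],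
        pvFoldB_acc t (PySem.Set.add s n) [n], ih (PySem.Set.add s n)]
      simp

-- level expansion: running A's queue through one whole level = frontier expansion
theorem pvLevel (graph : List (String × List String)) (l1 : List String) :
    ∀ (l2 : List String) (seen : PySem.Set String) (d : Int),
    pvLoopA graph (l1.map (fun x => (x, d)) ++ l2.map (fun x => (x, d + 1))) seen d
      = pvLoopA graph ((l1.foldl (pvExpandB graph) (seen, l2)).2.map (fun x => (x, d + 1)))
          (l1.foldl (pvExpandB graph) (seen, l2)).1 d := by
  induction l1 with
  | nil => intro l2 seen d; simp
  | cons node t ih =>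
    intro l2 seen d
    simp only [List.map_cons, List.cons_append, List.foldl_cons]
    conv_lhs => rw [pvLoopA]
    simp only [gt_iff_lt, lt_irrefl, if_false]
    rw [pvFoldA_acc d _ seen, pvFold_corr d _ seen]
    have hB : pvExpandB graph (seen, l2) node
        = ((((PySem.Dict.mk graph).getD node []).foldl pvStepB (seen, [])).1,
           l2 ++ (((PySem.Dict.mk graph).getD node []).foldl pvStepB (seen, [])).2) := by
      rw [pvExpandB, pvFoldB_acc]
    rw [hB]
    have := ih (l2 ++ (((PySem.Dict.mk graph).getD node []).foldl pvStepB (seen, [])).2)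
      (((PySem.Dict.mk graph).getD node []).foldl pvStepB (seen, [])).1 d
    simp only [List.map_append, List.append_assoc] at this ⊢
    exact this

-- bumping max_depth on the first node of the next level
theorem pvBump (graph : List (String × List String)) (x : String) (l : List String)
    (seen : PySem.Set String) (d : Int) :
    pvLoopA graph ((x :: l).map (fun y => (y, d + 1))) seen d
      = pvLoopA graph ((x :: l).map (fun y => (y, d + 1))) seen (d + 1) := by
  simp only [List.map_cons]
  conv_lhs => rw [pvLoopA]
  conv_rhs => rw [pvLoopA]
  simp only [gt_iff_lt, lt_irrefl, if_false, if_pos (lt_add_one d)]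

theorem pvMain (graph : List (String × List String)) :
    ∀ (n : Nat) (seen : PySem.Set String), pvCap graph seen ≤ n →
    ∀ (l : List String) (d : Int),
    pvLoopA graph (l.map (fun x => (x, d))) seen d = pvLoopF graph l seen d := by
  intro n
  induction n with
  | zero =>
    intro seen hcap l d
    conv_rhs => rw [pvLoopF]
    have hlev := pvLevel graph l [] seen d
    simp only [List.map_nil, List.append_nil] at hlev
    rw [hlev]
    rcases h2 : (l.foldl (pvExpandB graph) (seen, [])).2 with _ | ⟨x, tl⟩
    · simp only [List.map_nil, List.isEmpty_nil, if_true]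
      rw [pvLoopA]
    · exfalso
      have hle := pvExpandB_le graph l (seen, [])
      rw [h2] at hle
      simp only [List.length_cons, List.length_nil, Nat.zero_add] at hle
      omega
  | succ m ih =>
    intro seen hcap l d
    conv_rhs => rw [pvLoopF]
    have hlev := pvLevel graph l [] seen d
    simp only [List.map_nil, List.append_nil] at hlev
    rw [hlev]
    rcases h2 : (l.foldl (pvExpandB graph) (seen, [])).2 with _ | ⟨x, tl⟩
    · simp only [List.map_nil, List.isEmpty_nil, if_true]
      rw [pvLoopA]
    · have hle := pvExpandB_le graph l (seen, [])
      rw [h2] at hle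
      simp only [List.length_cons, List.length_nil, Nat.zero_add] at hle
      rw [pvBump]
      simp only [List.isEmpty_cons, Bool.false_eq_true, if_false]
      rw [← h2]
      exact ih (l.foldl (pvExpandB graph) (seen, [])).1 (by omega)
        (l.foldl (pvExpandB graph) (seen, [])).2 (d + 1)

-- ==== bridge from the frontier BFS to B's closure iteration ====

-- fold of Set.add is the set component of the frontier inner fold
theorem pvAddStepB (ns : List String) : ∀ (s : PySem.Set String) (l : List String),
    ns.foldl PySem.Set.add s = (ns.foldl pvStepB (s, l)).1 := by
  induction ns with
  | nil => intro s l; simp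
  | cons n t ih =>
    intro s l
    simp only [List.foldl_cons]
    by_cases hmem : n ∈ s
    · have h1 : PySem.Set.add s n = s := by simp [PySem.Set.add, PySem.Set.contains, hmem]
      have h2 : pvStepB (s, l) n = (s, l) := by simp [pvStepB, PySem.Set.contains, hmem]
      rw [h1, h2]; exact ih s l
    · have h1 : pvStepB (s, l) n = (PySem.Set.add s n, l ++ [n]) := by
        simp [pvStepB, PySem.Set.contains, hmem]
      rw [h1]; exact ih (PySem.Set.add s n) (l ++ [n])

-- a whole round of Set.update is the set component of the frontier expansion
theorem pvRoundExpand (graph : List (String × List String)) (frontier : List String) :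
    ∀ (s : PySem.Set String) (l : List String),
    frontier.foldl (pvRound graph) s = (frontier.foldl (pvExpandB graph) (s, l)).1 := by
  induction frontier with
  | nil => intro s l; simp
  | cons node t ih =>
    intro s l
    simp only [List.foldl_cons]
    have h1 : pvRound graph s node = (pvExpandB graph (s, l) node).1 := by
      rw [pvRound, PySem.Set.update, pvExpandB]
      exact pvAddStepB _ s l
    rw [h1]
    exact ih _ _

-- the set after an expansion is old set ++ new frontier
theorem pvStepB_split (ns : List String) : ∀ (s : PySem.Set String),
    (ns.foldl pvStepB (s, [])).1 = s ++ (ns.foldl pvStepB (s, [])).2 := by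
  induction ns with
  | nil => intro s; simp
  | cons n t ih =>
    intro s
    simp only [List.foldl_cons]
    by_cases hmem : n ∈ s
    · have h2 : pvStepB (s, []) n = (s, []) := by simp [pvStepB, PySem.Set.contains, hmem]
      rw [h2]; exact ih s
    · have h2 : pvStepB (s, []) n = (PySem.Set.add s n, [n]) := by
        simp [pvStepB, PySem.Set.contains, hmem]
      have hadd : PySem.Set.add s n = s ++ [n] := by
        simp [PySem.Set.add, PySem.Set.contains, hmem]
      rw [h2, pvFoldB_acc t (PySem.Set.add s n) [n], ih (PySem.Set.add s n), hadd]
      simp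

theorem pvExpandB_acc (graph : List (String × List String)) (t : List String) :
    ∀ (s : PySem.Set String) (l : List String),
    t.foldl (pvExpandB graph) (s, l)
      = ((t.foldl (pvExpandB graph) (s, [])).1, l ++ (t.foldl (pvExpandB graph) (s, [])).2) := by
  induction t with
  | nil => intro s l; simp
  | cons m tt ih =>
    intro s l
    simp only [List.foldl_cons]
    have hE : pvExpandB graph (s, l) m
        = ((pvExpandB graph (s, []) m).1, l ++ (pvExpandB graph (s, []) m).2) := by
      rw [pvExpandB, pvExpandB, pvFoldB_acc]
    rw [hE, ih (pvExpandB graph (s, []) m).1 (l ++ (pvExpandB graph (s, []) m).2),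
      ih (pvExpandB graph (s, []) m).1 (pvExpandB graph (s, []) m).2]
    simp

theorem pvExpandB_split (graph : List (String × List String)) (frontier : List String) :
    ∀ (s : PySem.Set String),
    (frontier.foldl (pvExpandB graph) (s, [])).1 = s ++ (frontier.foldl (pvExpandB graph) (s, [])).2 := by
  induction frontier with
  | nil => intro s; simp
  | cons node t ih =>
    intro s
    simp only [List.foldl_cons]
    have hsplit1 : (pvExpandB graph (s, []) node).1 = s ++ (pvExpandB graph (s, []) node).2 :=
      pvStepB_split _ s
    rw [show pvExpandB graph (s, []) node
        = ((pvExpandB graph (s, []) node).1, (pvExpandB graph (s, []) node).2) from rfl,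
      pvExpandB_acc graph t (pvExpandB graph (s, []) node).1 (pvExpandB graph (s, []) node).2,
      ih (pvExpandB graph (s, []) node).1, hsplit1]
    simp

-- membership monotonicity of the frontier folds
theorem pvStepB_mono (ns : List String) : ∀ (acc : PySem.Set String × List String) (a : String),
    a ∈ acc.1 → a ∈ (ns.foldl pvStepB acc).1 := by
  induction ns with
  | nil => intro acc a h; simpa using h
  | cons n t ih =>
    intro acc a h
    simp only [List.foldl_cons]
    refine ih _ a ?_
    by_cases hmem : n ∈ acc.1
    · simpa [pvStepB, PySem.Set.contains, hmem] using h
    · have : pvStepB acc n = (PySem.Set.add acc.1 n, acc.2 ++ [n]) := by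
        simp [pvStepB, PySem.Set.contains, hmem]
      rw [this]
      exact (PySem.Set.mem_add _ _ _).mpr (Or.inl h)

theorem pvStepB_cover (ns : List String) : ∀ (acc : PySem.Set String × List String) (v : String),
    v ∈ ns → v ∈ (ns.foldl pvStepB acc).1 := by
  induction ns with
  | nil => intro acc v h; simp at h
  | cons n t ih =>
    intro acc v h
    simp only [List.foldl_cons]
    rcases List.mem_cons.mp h with h | h
    · subst h
      refine pvStepB_mono t _ v ?_
      by_cases hmem : v ∈ acc.1
      · simp [pvStepB, PySem.Set.contains, hmem]
      · have : pvStepB acc v = (PySem.Set.add acc.1 v, acc.2 ++ [v]) := by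
          simp [pvStepB, PySem.Set.contains, hmem]
        rw [this]
        exact (PySem.Set.mem_add _ _ _).mpr (Or.inr rfl)
    · exact ih _ v h

theorem pvExpandB_mono (graph : List (String × List String)) (frontier : List String) :
    ∀ (acc : PySem.Set String × List String) (a : String),
    a ∈ acc.1 → a ∈ (frontier.foldl (pvExpandB graph) acc).1 := by
  induction frontier with
  | nil => intro acc a h; simpa using h
  | cons node t ih =>
    intro acc a h
    simp only [List.foldl_cons]
    exact ih _ a (pvStepB_mono _ acc a h)

theorem pvExpandB_cover (graph : List (String × List String)) (frontier : List String) :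
    ∀ (acc : PySem.Set String × List String) (u v : String),
    u ∈ frontier → v ∈ (PySem.Dict.mk graph).getD u [] →
    v ∈ (frontier.foldl (pvExpandB graph) acc).1 := by
  induction frontier with
  | nil => intro acc u v h _; simp at h
  | cons node t ih =>
    intro acc u v hu hv
    simp only [List.foldl_cons]
    rcases List.mem_cons.mp hu with h | h
    · subst h
      exact pvExpandB_mono graph t _ v (pvStepB_cover _ acc v hv)
    · exact ih _ u v h hv

-- successors of closed nodes add nothing
theorem pvRound_closed (graph : List (String × List String)) (old : List String) :
    ∀ (reach : PySem.Set String),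
    (∀ u ∈ old, ∀ v ∈ (PySem.Dict.mk graph).getD u [], v ∈ reach) →
    old.foldl (pvRound graph) reach = reach := by
  induction old with
  | nil => intro reach _; rfl
  | cons u t ih =>
    intro reach hclosed
    simp only [List.foldl_cons]
    have h1 : pvRound graph reach u = reach := by
      rw [pvRound, PySem.Set.update]
      obtain ⟨e, he, hp⟩ := pvFoldAdd ((PySem.Dict.mk graph).getD u []) reach
      rcases hex : e with _ | ⟨x, tl⟩
      · rw [hex] at he; simpa using he
      · exfalso
        have hx : x ∈ e := by rw [hex]; exact List.mem_cons_self
        exact (hp x hx).2 (hclosed u List.mem_cons_self x (hp x hx).1)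
    rw [h1]
    exact ih reach (fun v hv => hclosed v (List.mem_cons_of_mem _ hv))

-- main bridge: frontier BFS = closure iteration, under the level invariant
-- reach = old ++ frontier, with every successor of an `old` node already in reach
theorem pvBridge (graph : List (String × List String)) :
    ∀ (n : Nat) (reach : PySem.Set String), pvCap graph reach ≤ n →
    ∀ (old frontier : List String) (d : Int),
    reach = old ++ frontier →
    (∀ u ∈ old, ∀ v ∈ (PySem.Dict.mk graph).getD u [], v ∈ reach) →
    pvLoopF graph frontier reach d = pvLoopB graph reach d := by
  intro n
  induction n with
  | zero =>
    intro reach hcap old frontier d hsplit hclosed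
    have hempty : (frontier.foldl (pvExpandB graph) (reach, [])).2 = [] := by
      rcases h2 : (frontier.foldl (pvExpandB graph) (reach, [])).2 with _ | ⟨x, tl⟩
      · rfl
      · exfalso
        have hle := pvExpandB_le graph frontier (reach, [])
        rw [h2] at hle
        simp only [List.length_cons, List.length_nil, Nat.zero_add] at hle
        omega
    have h0 : List.foldl (pvRound graph) reach reach = List.foldl (pvRound graph) reach (old ++ frontier) := by
      rw [← hsplit]
    have hnr : reach.foldl (pvRound graph) reach = reach := by
      rw [h0, List.foldl_append, pvRound_closed graph old reach hclosed,
        pvRoundExpand graph frontier reach [], pvExpandB_split, hempty]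
      simp
    rw [pvLoopF, pvLoopB, hempty, hnr]
    simp
  | succ m ih =>
    intro reach hcap old frontier d hsplit hclosed
    have h0 : List.foldl (pvRound graph) reach reach = List.foldl (pvRound graph) reach (old ++ frontier) := by
      rw [← hsplit]
    have hnr : reach.foldl (pvRound graph) reach = (frontier.foldl (pvExpandB graph) (reach, [])).1 := by
      rw [h0, List.foldl_append, pvRound_closed graph old reach hclosed,
        pvRoundExpand graph frontier reach []]
    have hsp : (frontier.foldl (pvExpandB graph) (reach, [])).1
        = reach ++ (frontier.foldl (pvExpandB graph) (reach, [])).2 := pvExpandB_split graph frontier reach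
    rw [pvLoopF, pvLoopB, hnr, hsp]
    rcases h2 : (frontier.foldl (pvExpandB graph) (reach, [])).2 with _ | ⟨x, tl⟩
    · simp
    · have hc1 : (x :: tl).isEmpty = false := rfl
      have hc2 : ((reach ++ x :: tl).length == reach.length) = false := by
        simp only [List.length_append, List.length_cons, beq_eq_false_iff_ne]
        omega
      rw [hc1, hc2]
      simp only [Bool.false_eq_true, if_false]
      -- identify the freshly added block via pvFoldRound
      obtain ⟨extra, he, hp⟩ := pvFoldRound graph reach reach
      have hex : extra = x :: tl := by
        have : reach ++ extra = reach ++ (x :: tl) := by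
          rw [← he, hnr, hsp, h2]
        exact List.append_cancel_left this
      have hxprops := hp x (by rw [hex]; exact List.mem_cons_self)
      have hlt : pvCap graph (reach ++ x :: tl) < pvCap graph reach := by
        refine pvCap_grow_lt graph reach _ ?_ x hxprops.1 hxprops.2 ?_
        · intro a ha; exact List.mem_append.mpr (Or.inl ha)
        · exact List.mem_append.mpr (Or.inr List.mem_cons_self)
      rw [← h2, ← hsp]
      refine ih (frontier.foldl (pvExpandB graph) (reach, [])).1 ?_ reach
        (frontier.foldl (pvExpandB graph) (reach, [])).2 (d + 1) hsp ?_
      · rw [hsp, h2]; omega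
      · intro u hu v hv
        rw [hsp]
        rw [hsplit] at hu
        rcases List.mem_append.mp hu with h | h
        · exact List.mem_append.mpr (Or.inl (hclosed u h v hv))
        · rw [← hsp]
          exact pvExpandB_cover graph frontier (reach, []) u v h hv

-- ===== VERDICT (by name: the statement is the Claim_ definition above) =====
theorem bfs_depth_spec : Claim_equal_bfs_depth := by
  intro entry_id graph _
  unfold Spec_bfs_depth bfs_depth bfs_depth_alt
  split
  · rfl
  · have hofl : PySem.Set.ofList [entry_id] = [entry_id] := by
      simp [PySem.Set.ofList, PySem.Set.add, PySem.Set.contains]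
    have hA := pvMain graph (pvCap graph (PySem.Set.ofList [entry_id]))
      (PySem.Set.ofList [entry_id]) le_rfl [entry_id] 0
    have hB := pvBridge graph (pvCap graph (PySem.Set.ofList [entry_id]))
      (PySem.Set.ofList [entry_id]) le_rfl [] [entry_id] 0 (by rw [hofl]; rfl) (by simp)
    simp only [List.map_cons, List.map_nil] at hA
    rw [hA, hB]
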